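-- pv_equiv track=rewrite | github.com/lohtanvi/palautusrepositorio | viikko5/tennis/src/tennis_game.py | regular_score
-- ===== SOURCE A (Python) =====
-- def regular_score(score1, score2):
--     temp_score = 0
--     scores = ""
--     for i in range(1, 3):
--         if i == 1:
--             temp_score = score1
--         else:
--             scores = scores + "-"
--             temp_score = score2
--
--         if temp_score == 0:
--             scores = scores + "Love"
--         elif temp_score == 1:
--             scores = scores + "Fifteen"
--         elif temp_score == 2:
--             scores = scores + "Thirty"
--         elif temp_score == 3:
--             scores = scores + "Forty"
--     return scores
-- ===== SOURCE B (Python) =====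
-- def regular_score(score1, score2):
--     # Walk the name list structurally, decrementing the score; falling off
--     # either end (negative score or exhausted list) yields "".
--     def word(n, names):
--         if n < 0 or not names:
--             return ""
--         if n == 0:
--             return names[0]
--         return word(n - 1, names[1:])
--
--     names = ["Love", "Fifteen", "Thirty", "Forty"]
--     return word(score1, names) + "-" + word(score2, names)
-- ===== Notes on version B (the rewrite author's own statement) =====
-- stated objective: alternative
-- what changed: Replaces A's two-iteration loop with a mutated temp_score and an if/elif chain by a recursive walk over a name list (decrement the score while consuming the list, '' when either runs out), applied to each score around a constant '-'.
import Mathlib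
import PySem

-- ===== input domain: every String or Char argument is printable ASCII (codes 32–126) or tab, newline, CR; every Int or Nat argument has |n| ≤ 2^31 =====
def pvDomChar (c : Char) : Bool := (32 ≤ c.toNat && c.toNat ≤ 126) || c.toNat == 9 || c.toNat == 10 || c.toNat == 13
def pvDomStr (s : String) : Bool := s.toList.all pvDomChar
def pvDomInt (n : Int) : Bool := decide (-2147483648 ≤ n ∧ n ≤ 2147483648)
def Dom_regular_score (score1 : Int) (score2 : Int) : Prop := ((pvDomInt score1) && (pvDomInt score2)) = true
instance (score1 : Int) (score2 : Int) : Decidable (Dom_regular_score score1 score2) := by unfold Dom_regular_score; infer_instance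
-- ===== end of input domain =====

-- B replaces A's loop + if/elif chain by a recursive walk over a name list (alternative decomposition).


-- ===== PORT A =====
def regular_score (score1 : Int) (score2 : Int) : String :=
  -- literal port of A: loop over range(1,3) carrying (temp_score, scores)
  (((PySem.List.pyRange 1 3 1).foldl (fun (st : Int × String) (i : Int) =>
      let p := if i == 1 then (score1, st.2) else (score2, st.2 ++ "-")
      let scores :=
        if p.1 == 0 then p.2 ++ "Love"
        else if p.1 == 1 then p.2 ++ "Fifteen"
        else if p.1 == 2 then p.2 ++ "Thirty"
        else if p.1 == 3 then p.2 ++ "Forty"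
        else p.2
      (p.1, scores)) ((0 : Int), ""))).2

-- ===== PORT B =====
-- recursive walk: decrement the score while consuming the list; "" when either runs out
def scoreWord : Int → List String → String
  | _, [] => ""
  | n, w :: ws => if n < 0 then "" else if n = 0 then w else scoreWord (n - 1) ws

def regular_score_alt (score1 : Int) (score2 : Int) : String :=
  let names := ["Love", "Fifteen", "Thirty", "Forty"]
  scoreWord score1 names ++ "-" ++ scoreWord score2 names

-- ===== PRECONDITION & SPEC =====
def Spec_regular_score (score1 : Int) (score2 : Int) (out : String) : Prop := out = regular_score_alt score1 score2
instance (score1 : Int) (score2 : Int) (out : String) : Decidable (Spec_regular_score score1 score2 out) := by unfold Spec_regular_score; infer_instance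

-- ===== CLAIM (what is proved, stated in full; the proofs are below) =====
def Claim_equal_regular_score : Prop := ∀ (score1 : Int) (score2 : Int), Dom_regular_score score1 score2 → Spec_regular_score score1 score2 (regular_score score1 score2)

-- ===== LEMMAS AND PROOFS =====
-- B's recursive walk as an if-chain, one case per score value
theorem scoreWord_eq (n : Int) : scoreWord n ["Love", "Fifteen", "Thirty", "Forty"] =
    if n = 0 then "Love" else if n = 1 then "Fifteen"
    else if n = 2 then "Thirty" else if n = 3 then "Forty" else "" := by
  rcases eq_or_ne n 0 with h0 | h0
  · subst h0; decide
  rcases eq_or_ne n 1 with h1 | h1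
  · subst h1; decide
  rcases eq_or_ne n 2 with h2 | h2
  · subst h2; decide
  rcases eq_or_ne n 3 with h3 | h3
  · subst h3; decide
  simp only [scoreWord, h0, h1, h2, h3, if_false]
  have e1 : n - 1 ≠ 0 := by omega
  have e2 : n - 1 - 1 ≠ 0 := by omega
  have e3 : n - 1 - 1 - 1 ≠ 0 := by omega
  by_cases hneg : n < 0
  · simp [hneg]
  · have g1 : ¬ n - 1 < 0 := by omega
    have g2 : ¬ n - 1 - 1 < 0 := by omega
    have g3 : ¬ n - 1 - 1 - 1 < 0 := by omega
    simp [hneg, g1, g2, g3, e1, e2, e3]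

-- ===== VERDICT (by name: the statement is the Claim_ definition above) =====
theorem regular_score_spec : Claim_equal_regular_score := by
  intro s1 s2 _
  unfold Spec_regular_score regular_score regular_score_alt
  rw [show PySem.List.pyRange 1 3 1 = [1, 2] from by decide]
  simp only [List.foldl, scoreWord_eq]
  rcases eq_or_ne s1 0 with h1|h1 <;> rcases eq_or_ne s1 1 with h1b|h1b <;>
  rcases eq_or_ne s1 2 with h1c|h1c <;> rcases eq_or_ne s1 3 with h1d|h1d <;>
  rcases eq_or_ne s2 0 with h2|h2 <;> rcases eq_or_ne s2 1 with h2b|h2b <;>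
  rcases eq_or_ne s2 2 with h2c|h2c <;> rcases eq_or_ne s2 3 with h2d|h2d <;>
    simp_all
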